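-- pv_equiv track=rewrite | github.com/ITareadomus/ad_wass | alg.py | calculate_cleaners_needed
-- ===== SOURCE A (Python) =====
-- def calculate_cleaners_needed(apartments):
--     # Separa gli apt premium e standard
--     premium_apts = [a for a in apartments if a["type"].lower() == "premium"]
--     standard_apts = [a for a in apartments if a["type"].lower() == "standard"]
--
--     def estimate_cleaners(num_apt):
--         # Preferiamo assegnare 4 apt per cleaner
--         cleaners = num_apt // 4
--         rest = num_apt % 4
--         if rest > 0:
--             cleaners += 1
--         return cleaners
--
--     n_premium_cleaners = estimate_cleaners(len(premium_apts))
--     n_standard_cleaners = estimate_cleaners(len(standard_apts))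
--
--     return n_premium_cleaners, n_standard_cleaners
-- ===== SOURCE B (Python) =====
-- def calculate_cleaners_needed(apartments):
--     # Greedy one-pass bin-packing simulation: walk the apartments once, keeping
--     # for each type the remaining capacity of the currently open cleaner; open a
--     # new cleaner (capacity 4) whenever an apartment arrives and none is free.
--     # No counting or division: correct because cleaners are filled group-by-group.
--     premium_cleaners = standard_cleaners = 0
--     premium_free = standard_free = 0
--     for a in apartments:
--         t = a["type"].lower()
--         if t == "premium":
--             if premium_free == 0:
--                 premium_cleaners += 1
--                 premium_free = 4
--             premium_free -= 1
--         elif t == "standard":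
--             if standard_free == 0:
--                 standard_cleaners += 1
--                 standard_free = 4
--             standard_free -= 1
--     return premium_cleaners, standard_cleaners
-- ===== Notes on version B (the rewrite author's own statement) =====
-- stated objective: alternative
-- what changed: Replaces A's filter-count-then-divide arithmetic with a single-pass greedy bin-packing simulation that opens a cleaner of capacity 4 on demand and never divides or materialises filtered lists.
import Mathlib
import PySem

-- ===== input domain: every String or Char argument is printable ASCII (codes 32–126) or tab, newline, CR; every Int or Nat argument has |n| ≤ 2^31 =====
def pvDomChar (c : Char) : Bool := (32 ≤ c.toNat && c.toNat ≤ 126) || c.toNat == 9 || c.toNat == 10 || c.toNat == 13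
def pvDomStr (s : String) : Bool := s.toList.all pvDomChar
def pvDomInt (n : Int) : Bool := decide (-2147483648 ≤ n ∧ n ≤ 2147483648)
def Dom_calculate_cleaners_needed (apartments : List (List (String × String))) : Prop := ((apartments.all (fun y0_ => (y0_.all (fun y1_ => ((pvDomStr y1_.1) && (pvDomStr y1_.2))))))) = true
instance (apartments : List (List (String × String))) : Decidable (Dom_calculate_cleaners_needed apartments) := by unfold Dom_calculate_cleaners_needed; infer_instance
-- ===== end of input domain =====

-- B replaces A's filter-count-then-divide arithmetic with a single-pass greedy
-- bin-packing simulation that opens a capacity-4 cleaner on demand (objective: alternative).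

-- ===== PORT A =====
-- a["type"] (KeyError excluded by Pre_) followed by .lower()
def pvTypeLower (a : List (String × String)) : String :=
  PySem.Str.lower (((PySem.Dict.mk a).get? "type").getD "")

def pvEstimateCleaners (num_apt : Int) : Int :=
  let cleaners := PySem.Int.floordiv num_apt 4
  let rest := PySem.Int.mod num_apt 4
  if rest > 0 then cleaners + 1 else cleaners

def calculate_cleaners_needed (apartments : List (List (String × String))) : Int × Int :=
  let premium_apts := apartments.filter (fun a => pvTypeLower a == "premium")
  let standard_apts := apartments.filter (fun a => pvTypeLower a == "standard")
  let n_premium_cleaners := pvEstimateCleaners (premium_apts.length : Int)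
  let n_standard_cleaners := pvEstimateCleaners (standard_apts.length : Int)
  (n_premium_cleaners, n_standard_cleaners)

-- ===== PORT B =====
-- state: (premium_cleaners, premium_free, standard_cleaners, standard_free)
def pvGreedyStep (st : Int × Int × Int × Int) (a : List (String × String)) :
    Int × Int × Int × Int :=
  let t := pvTypeLower a
  if t == "premium" then
    if st.2.1 == 0 then (st.1 + 1, 4 - 1, st.2.2.1, st.2.2.2)
    else (st.1, st.2.1 - 1, st.2.2.1, st.2.2.2)
  else if t == "standard" then
    if st.2.2.2 == 0 then (st.1, st.2.1, st.2.2.1 + 1, 4 - 1)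
    else (st.1, st.2.1, st.2.2.1, st.2.2.2 - 1)
  else st

def calculate_cleaners_needed_alt (apartments : List (List (String × String))) : Int × Int :=
  let st := apartments.foldl pvGreedyStep (0, 0, 0, 0)
  (st.1, st.2.2.1)

-- ===== PRECONDITION & SPEC =====
-- Pre_ excludes apartments missing the "type" key, on which A raises KeyError (B raises too).
def Pre_calculate_cleaners_needed (apartments : List (List (String × String))) : Prop :=
  (apartments.all (fun a => ((PySem.Dict.mk a).get? "type").isSome)) = true
instance (apartments : List (List (String × String))) : Decidable (Pre_calculate_cleaners_needed apartments) := by unfold Pre_calculate_cleaners_needed; infer_instance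
def pvWitness_calculate_cleaners_needed : (List (List (String × String))) :=
  [[("type", "Premium")], [("type", "standard")], [("type", "loft")]]

def Spec_calculate_cleaners_needed (apartments : List (List (String × String))) (out : Int × Int) : Prop := out = calculate_cleaners_needed_alt apartments
instance (apartments : List (List (String × String))) (out : Int × Int) : Decidable (Spec_calculate_cleaners_needed apartments out) := by unfold Spec_calculate_cleaners_needed; infer_instance

-- ===== CLAIM (what is proved, stated in full; the proofs are below) =====
def Claim_equal_calculate_cleaners_needed : Prop := ∀ (apartments : List (List (String × String))), Dom_calculate_cleaners_needed apartments → Pre_calculate_cleaners_needed apartments → Spec_calculate_cleaners_needed apartments (calculate_cleaners_needed apartments)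

-- ===== LEMMAS AND PROOFS =====

-- invariant: free = 4*cleaners - served, 0 ≤ free < 4
def pvInv (cleaners free served : Int) : Prop :=
  free = 4 * cleaners - served ∧ 0 ≤ free ∧ free < 4

lemma pvGreedy_inv (l : List (List (String × String))) :
    ∀ (cp fp cs fs p s : Int), pvInv cp fp p → pvInv cs fs s →
    pvInv (l.foldl pvGreedyStep (cp, fp, cs, fs)).1
          (l.foldl pvGreedyStep (cp, fp, cs, fs)).2.1
          (p + ((l.countP (fun a => pvTypeLower a == "premium") : Nat) : Int)) ∧
    pvInv (l.foldl pvGreedyStep (cp, fp, cs, fs)).2.2.1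
          (l.foldl pvGreedyStep (cp, fp, cs, fs)).2.2.2
          (s + ((l.countP (fun a => pvTypeLower a == "standard") : Nat) : Int)) := by
  induction l with
  | nil => intro cp fp cs fs p s hp hs; simpa using ⟨hp, hs⟩
  | cons a l ih =>
    intro cp fp cs fs p s hp hs
    obtain ⟨hpe, hp0, hp4⟩ := hp
    obtain ⟨hse, hs0, hs4⟩ := hs
    simp only [List.foldl_cons, List.countP_cons, pvGreedyStep]
    by_cases h1 : pvTypeLower a == "premium"
    · have h2 : (pvTypeLower a == "standard") = false := by
        rw [beq_iff_eq] at h1; rw [h1]; decide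
      simp only [h1, h2, if_true, Bool.false_eq_true, if_false, Nat.add_zero]
      have e1 : p + ((l.countP (fun a => pvTypeLower a == "premium") + 1 : Nat) : Int)
          = (p + 1) + ((l.countP (fun a => pvTypeLower a == "premium") : Nat) : Int) := by
        push_cast; ring
      rw [e1]
      by_cases hf : fp == (0 : Int)
      · have hf' : fp = 0 := by simpa using hf
        simp only [hf, if_true]
        exact ih (cp + 1) (4 - 1) cs fs (p + 1) s
          ⟨by omega, by omega, by omega⟩ ⟨hse, hs0, hs4⟩
      · have hf' : ¬ fp = 0 := by simpa using hf
        simp only [hf, Bool.false_eq_true, if_false]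
        exact ih cp (fp - 1) cs fs (p + 1) s
          ⟨by omega, by omega, by omega⟩ ⟨hse, hs0, hs4⟩
    · by_cases h2 : pvTypeLower a == "standard"
      · simp only [h1, h2, if_true, Bool.false_eq_true, if_false, Nat.add_zero]
        have e1 : s + ((l.countP (fun a => pvTypeLower a == "standard") + 1 : Nat) : Int)
            = (s + 1) + ((l.countP (fun a => pvTypeLower a == "standard") : Nat) : Int) := by
          push_cast; ring
        rw [e1]
        by_cases hf : fs == (0 : Int)
        · have hf' : fs = 0 := by simpa using hf
          simp only [hf, if_true]
          exact ih cp fp (cs + 1) (4 - 1) p (s + 1)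
            ⟨hpe, hp0, hp4⟩ ⟨by omega, by omega, by omega⟩
        · have hf' : ¬ fs = 0 := by simpa using hf
          simp only [hf, Bool.false_eq_true, if_false]
          exact ih cp fp cs (fs - 1) p (s + 1)
            ⟨hpe, hp0, hp4⟩ ⟨by omega, by omega, by omega⟩
      · simp only [h1, h2, Bool.false_eq_true, if_false, Nat.add_zero]
        exact ih cp fp cs fs p s ⟨hpe, hp0, hp4⟩ ⟨hse, hs0, hs4⟩

-- the invariant pins the cleaner count to A's estimate
lemma pvInv_eq_estimate (q f n : Int) (h : pvInv q f n) :
    q = pvEstimateCleaners n := by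
  obtain ⟨he, h0, h4⟩ := h
  have hpos : (0 : Int) < 4 := by norm_num
  simp only [pvEstimateCleaners, PySem.Int.floordiv_eq_ediv_of_pos hpos,
    PySem.Int.mod_eq_emod_of_pos hpos]
  split <;> omega

-- ===== VERDICT (by name: the statement is the Claim_ definition above) =====
theorem calculate_cleaners_needed_spec : Claim_equal_calculate_cleaners_needed := by
  intro apartments _ _
  show calculate_cleaners_needed apartments = calculate_cleaners_needed_alt apartments
  have h := pvGreedy_inv apartments 0 0 0 0 0 0
    ⟨by ring, le_refl 0, by norm_num⟩ ⟨by ring, le_refl 0, by norm_num⟩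
  simp only [zero_add] at h
  simp only [calculate_cleaners_needed, calculate_cleaners_needed_alt,
    ← List.countP_eq_length_filter]
  exact Prod.ext (pvInv_eq_estimate _ _ _ h.1).symm (pvInv_eq_estimate _ _ _ h.2).symm
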